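-- pv_equiv track=rewrite | github.com/NoMoreZer0/lcc-aldar-kose | ml/src/cli/generate_story.py | _postprocess_frames_metadata_only
-- ===== SOURCE A (Python) =====
-- from typing import Any, Dict, List
--
-- ALLOWED_CAMERA_DIRECTIONS = [
--     "wide establishing shot",
--     "mid-shot",
--     "close-up",
--     "over-the-shoulder",
--     "dynamic three-quarter angle",
--     "low-angle hero shot",
--     "bird's-eye view",
--     "tracking side profile",
-- ]
--
-- ALLOWED_STYLE_TAGS = [
--     "painterly realism",
--     "golden hour cinematic",
--     "moonlit mystery",
--     "crisp morning light",
--     "warm hearth glow",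
--     "wind-swept steppe",
-- ]
--
-- def _postprocess_frames_metadata_only(frames: List[Dict[str, Any]]) -> List[Dict[str, Any]]:
--     """
--     Only adjusts metadata to avoid immediate repeats of camera/style.
--     DOES NOT touch 'prompt' content (keeps GPT-5 text verbatim).
--     """
--     for i in range(1, len(frames)):
--         if frames[i]["camera_direction"] == frames[i - 1]["camera_direction"]:
--             for cand in ALLOWED_CAMERA_DIRECTIONS:
--                 if cand != frames[i - 1]["camera_direction"]:
--                     frames[i]["camera_direction"] = cand
--                     break
--         if frames[i]["style_tag"] == frames[i - 1]["style_tag"]: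
--             for cand in ALLOWED_STYLE_TAGS:
--                 if cand != frames[i - 1]["style_tag"]:
--                     frames[i]["style_tag"] = cand
--                     break
--     return frames
-- ===== SOURCE B (Python) =====
-- from typing import Any, Dict, List
--
-- ALLOWED_CAMERA_DIRECTIONS = [
--     "wide establishing shot",
--     "mid-shot",
--     "close-up",
--     "over-the-shoulder",
--     "dynamic three-quarter angle",
--     "low-angle hero shot",
--     "bird's-eye view",
--     "tracking side profile",
-- ]
--
-- ALLOWED_STYLE_TAGS = [
--     "painterly realism",
--     "golden hour cinematic",
--     "moonlit mystery",
--     "crisp morning light",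
--     "warm hearth glow",
--     "wind-swept steppe",
-- ]
--
--
-- def _fix_column(values, allowed):
--     """Scan one metadata column on its own: each value that repeats the
--     previously emitted one is replaced by the first allowed value that
--     differs from it (allowed[0], or allowed[1] when the previous IS allowed[0])."""
--     out = [values[0]]
--     for v in values[1:]:
--         prev = out[-1]
--         out.append((allowed[0] if prev != allowed[0] else allowed[1]) if v == prev else v)
--     return out
--
--
-- def _postprocess_frames_metadata_only(frames: List[Dict[str, Any]]) -> List[Dict[str, Any]]:
--     """Columnar rewrite: extract the two metadata columns, de-repeat each
--     column independently with a scan, then write both columns back row by row."""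
--     if len(frames) < 2:
--         return frames
--     cams = _fix_column([f["camera_direction"] for f in frames], ALLOWED_CAMERA_DIRECTIONS)
--     tags = _fix_column([f["style_tag"] for f in frames], ALLOWED_STYLE_TAGS)
--     for f, c, t in zip(frames, cams, tags):
--         f["camera_direction"] = c
--         f["style_tag"] = t
--     return frames
-- ===== Notes on version B (the rewrite author's own statement) =====
-- stated objective: alternative
-- what changed: Replaces A's single row-wise in-place pass with inner scans over the constant candidate lists by a columnar decomposition: extract the camera and style columns, de-repeat each column independently with a scan using the closed-form pick (allowed[0], or allowed[1] when the previous value is allowed[0]), then write both columns back row by row.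
import Mathlib
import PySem

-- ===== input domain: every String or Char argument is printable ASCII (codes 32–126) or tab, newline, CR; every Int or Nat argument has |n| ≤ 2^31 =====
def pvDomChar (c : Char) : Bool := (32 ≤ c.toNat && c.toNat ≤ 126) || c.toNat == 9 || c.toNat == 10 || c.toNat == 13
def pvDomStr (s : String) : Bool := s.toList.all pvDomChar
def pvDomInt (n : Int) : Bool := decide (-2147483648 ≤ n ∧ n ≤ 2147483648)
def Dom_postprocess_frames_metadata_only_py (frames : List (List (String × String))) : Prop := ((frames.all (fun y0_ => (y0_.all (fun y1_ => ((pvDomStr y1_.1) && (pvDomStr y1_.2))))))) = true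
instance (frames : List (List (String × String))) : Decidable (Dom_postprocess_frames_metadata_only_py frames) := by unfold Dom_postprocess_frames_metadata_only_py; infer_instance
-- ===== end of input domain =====

-- B replaces A's row-wise in-place pass (with inner scans over the constant candidate
-- lists) by a columnar decomposition: extract each metadata column, de-repeat it with an
-- independent scan using the closed-form pick, then write both columns back row by row
-- (objective: alternative). Both A and B mutate the frame dicts in place in Python; the
-- equivalence proved here is about the returned value (B's observable mutations coincide).


-- shared module constants and the dict primitives d[k] (total form, exact when the key
-- is present — Pre_ guarantees that) and d[k] = v
def pvCams : List String :=
  ["wide establishing shot", "mid-shot", "close-up", "over-the-shoulder",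
   "dynamic three-quarter angle", "low-angle hero shot", "bird's-eye view",
   "tracking side profile"]

def pvStyles : List String :=
  ["painterly realism", "golden hour cinematic", "moonlit mystery",
   "crisp morning light", "warm hearth glow", "wind-swept steppe"]

def pvDGet (d : List (String × String)) (k : String) : String :=
  (PySem.Dict.mk d).getD k ""

def pvDSet (d : List (String × String)) (k v : String) : List (String × String) :=
  ((PySem.Dict.mk d).insert k v).items

-- ===== PORT A =====
-- inner loop: `for cand in CANDS: if cand != prev_val: frames[i][key] = cand; break`
def pvScanSet (cands : List String) (prevVal : String) (d : List (String × String)) (key : String) : List (String × String) :=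
  match cands with
  | [] => d
  | c :: rest => if c ≠ prevVal then pvDSet d key c else pvScanSet rest prevVal d key

-- one iteration of `for i in range(1, len(frames))`
def pvStepA (fs : List (List (String × String))) (i : Int) : List (List (String × String)) :=
  let prev := PySem.List.pyGetD fs (i - 1) []
  let cur := PySem.List.pyGetD fs i []
  let cur :=
    if pvDGet cur "camera_direction" == pvDGet prev "camera_direction" then
      pvScanSet pvCams (pvDGet prev "camera_direction") cur "camera_direction"
    else cur
  let cur :=
    if pvDGet cur "style_tag" == pvDGet prev "style_tag" then
      pvScanSet pvStyles (pvDGet prev "style_tag") cur "style_tag"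
    else cur
  PySem.List.pySetD fs i cur

def postprocess_frames_metadata_only_py (frames : List (List (String × String))) : List (List (String × String)) :=
  (PySem.List.pyRange 1 (frames.length : Int) 1).foldl pvStepA frames

-- ===== PORT B =====
-- `allowed[0] if prev != allowed[0] else allowed[1]`
def pvPickB (prev a0 a1 : String) : String := if prev ≠ a0 then a0 else a1

-- the loop of _fix_column: `out.append(pick if v == out[-1] else v)`
def pvFixColGo (a0 a1 prev : String) : List String → List String
  | [] => []
  | v :: rest =>
    let nv := if v == prev then pvPickB prev a0 a1 else v
    nv :: pvFixColGo a0 a1 nv rest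

-- _fix_column (its caller guarantees a nonempty column; [] is unreachable there)
def pvFixCol (a0 a1 : String) (values : List String) : List String :=
  match values with
  | [] => []
  | v :: rest => v :: pvFixColGo a0 a1 v rest

def postprocess_frames_metadata_only_py_alt (frames : List (List (String × String))) : List (List (String × String)) :=
  if frames.length < 2 then frames
  else
    let cams := pvFixCol "wide establishing shot" "mid-shot"
      (frames.map (fun f => pvDGet f "camera_direction"))
    let tags := pvFixCol "painterly realism" "golden hour cinematic"
      (frames.map (fun f => pvDGet f "style_tag"))
    (frames.zip (cams.zip tags)).map
      (fun p => pvDSet (pvDSet p.1 "camera_direction" p.2.1) "style_tag" p.2.2)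

-- ===== PRECONDITION & SPEC =====
-- a frame dict: both metadata keys present, and (being a Python dict) no duplicate keys
abbrev pvFrameOK (f : List (String × String)) : Prop :=
  (PySem.Dict.mk f).contains "camera_direction" = true ∧
  (PySem.Dict.mk f).contains "style_tag" = true ∧
  (f.map Prod.fst).Nodup

-- Pre_ excludes exactly the inputs on which Python A raises KeyError (with at least two
-- frames, every frame dict must contain both "camera_direction" and "style_tag") and the
-- association lists with duplicate keys, which do not represent any Python dict at all.
def Pre_postprocess_frames_metadata_only_py (frames : List (List (String × String))) : Prop :=
  1 < frames.length → ∀ f ∈ frames, pvFrameOK f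
instance (frames : List (List (String × String))) : Decidable (Pre_postprocess_frames_metadata_only_py frames) := by unfold Pre_postprocess_frames_metadata_only_py; infer_instance

def pvWitness_postprocess_frames_metadata_only_py : (List (List (String × String))) :=
  [[("camera_direction", "mid-shot"), ("style_tag", "moonlit mystery"), ("prompt", "a yurt")],
   [("camera_direction", "mid-shot"), ("style_tag", "warm hearth glow")]]

def Spec_postprocess_frames_metadata_only_py (frames : List (List (String × String))) (out : List (List (String × String))) : Prop := out = postprocess_frames_metadata_only_py_alt frames
instance (frames : List (List (String × String))) (out : List (List (String × String))) : Decidable (Spec_postprocess_frames_metadata_only_py frames out) := by unfold Spec_postprocess_frames_metadata_only_py; infer_instance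

-- ===== CLAIM (what is proved, stated in full; the proofs are below) =====
def Claim_equal_postprocess_frames_metadata_only_py : Prop := ∀ (frames : List (List (String × String))), Dom_postprocess_frames_metadata_only_py frames → Pre_postprocess_frames_metadata_only_py frames → Spec_postprocess_frames_metadata_only_py frames (postprocess_frames_metadata_only_py frames)

-- ===== LEMMAS AND PROOFS =====

-- proof-side intermediate: A's pass written as a pairwise sweep over rows
def pvFixFrame (prev cur : List (String × String)) : List (String × String) :=
  let cur :=
    if pvDGet cur "camera_direction" == pvDGet prev "camera_direction" then
      pvDSet cur "camera_direction" (pvPickB (pvDGet prev "camera_direction") "wide establishing shot" "mid-shot")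
    else cur
  let cur :=
    if pvDGet cur "style_tag" == pvDGet prev "style_tag" then
      pvDSet cur "style_tag" (pvPickB (pvDGet prev "style_tag") "painterly realism" "golden hour cinematic")
    else cur
  cur

def pvSweep (prev : List (String × String)) : List (List (String × String)) → List (List (String × String))
  | [] => []
  | cur :: rest =>
    let cur' := pvFixFrame prev cur
    cur' :: pvSweep cur' rest

lemma getD_append_cons {α : Type} (l : List α) (x : α) (xs : List α) (d : α) :
    (l ++ x :: xs).getD l.length d = x := by
  induction l with
  | nil => rfl
  | cons a t ih => simp

lemma set_append_cons {α : Type} (l : List α) (x : α) (xs : List α) (v : α) :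
    (l ++ x :: xs).set l.length v = l ++ v :: xs := by
  induction l with
  | nil => rfl
  | cons a t ih => simp [ih]

-- A's scan over the constant camera list is the closed-form pick.
lemma scan_cams (prevVal : String) (d : List (String × String)) :
    pvScanSet pvCams prevVal d "camera_direction"
      = pvDSet d "camera_direction" (pvPickB prevVal "wide establishing shot" "mid-shot") := by
  by_cases h : prevVal = "wide establishing shot"
  · subst h; simp [pvCams, pvScanSet, pvPickB]
  · simp [pvCams, pvScanSet, pvPickB, h, Ne.symm h]

lemma scan_styles (prevVal : String) (d : List (String × String)) :
    pvScanSet pvStyles prevVal d "style_tag"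
      = pvDSet d "style_tag" (pvPickB prevVal "painterly realism" "golden hour cinematic") := by
  by_cases h : prevVal = "painterly realism"
  · subst h; simp [pvStyles, pvScanSet, pvPickB]
  · simp [pvStyles, pvScanSet, pvPickB, h, Ne.symm h]

-- one iteration of A's indexed loop, at position done.length + 1, is one frame fix
lemma stepA_at (done : List (List (String × String))) (prev cur : List (String × String))
    (rest : List (List (String × String))) :
    pvStepA (done ++ prev :: cur :: rest) ((done.length : Int) + 1)
      = done ++ prev :: pvFixFrame prev cur :: rest := by
  have hg1 : PySem.List.pyGetD (done ++ prev :: cur :: rest) ((done.length : Int) + 1 - 1) ([] : List (String × String)) = prev := by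
    simp [PySem.List.pyGetD_natCast]
  have hcast : ((done.length : Int) + 1) = ((done.length + 1 : Nat) : Int) := by push_cast; ring
  have hg2 : PySem.List.pyGetD (done ++ prev :: cur :: rest) ((done.length : Int) + 1) ([] : List (String × String)) = cur := by
    rw [hcast, PySem.List.pyGetD_natCast]
    have h1 : done ++ prev :: cur :: rest = (done ++ [prev]) ++ cur :: rest := by simp
    rw [h1]
    have hl : done.length + 1 = (done ++ [prev]).length := by simp
    rw [hl, getD_append_cons]
  have hs : ∀ v, PySem.List.pySetD (done ++ prev :: cur :: rest) ((done.length : Int) + 1) v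
      = done ++ prev :: v :: rest := by
    intro v
    rw [hcast, PySem.List.pySetD_natCast]
    have h1 : done ++ prev :: cur :: rest = (done ++ [prev]) ++ cur :: rest := by simp
    rw [h1]
    have hl : done.length + 1 = (done ++ [prev]).length := by simp
    rw [hl, set_append_cons]
    simp
  unfold pvStepA pvFixFrame
  rw [hg1, hg2]
  simp only [scan_cams, scan_styles, hs]

-- the invariant: with `done` frames already processed and `prev` the last processed
-- frame, A's remaining indexed loop is the pairwise sweep over the suffix
lemma loop_eq (rest : List (List (String × String))) : ∀ (done : List (List (String × String))) (prev : List (String × String)),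
    (PySem.List.pyRange ((done.length : Int) + 1) ((done.length : Int) + 1 + rest.length) 1).foldl
        pvStepA (done ++ prev :: rest)
      = done ++ prev :: pvSweep prev rest := by
  induction rest with
  | nil =>
    intro done prev
    simp [PySem.List.pyRange_one_eq_nil, pvSweep]
  | cons cur rest ih =>
    intro done prev
    have hlt : ((done.length : Int) + 1) < ((done.length : Int) + 1 + (cur :: rest).length) := by
      simp only [List.length_cons]
      push_cast
      omega
    rw [PySem.List.pyRange_one_cons hlt]
    rw [List.foldl_cons, stepA_at]
    have h2 := ih (done ++ [prev]) (pvFixFrame prev cur)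
    have hlen : ((done ++ [prev]).length : Int) = (done.length : Int) + 1 := by simp
    rw [hlen] at h2
    have harr : (done ++ [prev]) ++ pvFixFrame prev cur :: rest = done ++ prev :: pvFixFrame prev cur :: rest := by simp
    rw [harr] at h2
    have hrange : (done.length : Int) + 1 + 1 + (rest.length : Int) = (done.length : Int) + 1 + ((cur :: rest).length : Int) := by
      simp only [List.length_cons]
      push_cast
      ring
    rw [hrange] at h2
    rw [h2]
    simp [pvSweep]

-- dict facts about pvDGet / pvDSet
lemma pvDGet_set_self (d : List (String × String)) (k v : String) :
    pvDGet (pvDSet d k v) k = v := by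
  unfold pvDGet pvDSet
  exact PySem.Dict.getD_insert_self _ _ _ _

lemma pvDGet_set_ne (d : List (String × String)) (k v k' : String) (h : k' ≠ k) :
    pvDGet (pvDSet d k v) k' = pvDGet d k' := by
  unfold pvDGet pvDSet
  exact PySem.Dict.getD_insert_of_ne _ _ _ h

lemma map_fst_set (d : List (String × String)) (k v : String)
    (hc : (PySem.Dict.mk d).contains k = true) :
    (pvDSet d k v).map Prod.fst = d.map Prod.fst := by
  have h := PySem.Dict.keys_insert_of_contains (d := PySem.Dict.mk d) (v := v) hc
  simpa [PySem.Dict.keys, pvDSet] using h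

lemma contains_set (d : List (String × String)) (k v k' : String)
    (hc : (PySem.Dict.mk d).contains k' = true) :
    (PySem.Dict.mk (pvDSet d k v)).contains k' = true := by
  unfold pvDSet
  rw [show PySem.Dict.mk ((PySem.Dict.mk d).insert k v).items = (PySem.Dict.mk d).insert k v from rfl]
  rw [PySem.Dict.contains_insert]
  simp [hc]

lemma pvDSet_self (d : List (String × String)) (k : String)
    (hnd : (d.map Prod.fst).Nodup) (hc : (PySem.Dict.mk d).contains k = true) :
    pvDSet d k (pvDGet d k) = d := by
  unfold pvDSet
  rw [PySem.Dict.items_insert_of_contains _ _ hc]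
  conv_rhs => rw [show d = d.map id from (List.map_id d).symm]
  apply List.map_congr_left
  intro p hp
  by_cases h : p.1 = k
  · have hmem : (k, p.2) ∈ (PySem.Dict.mk d).items := by
      rw [← h]; simpa using hp
    have hg : (PySem.Dict.mk d).getD k "" = p.2 :=
      PySem.Dict.getD_of_mem_items _ hmem (by simpa [PySem.Dict.keys] using hnd) ""
    simp only [h, beq_self_eq_true, if_pos, id]
    rw [pvDGet, hg, ← h]
  · simp [h]

-- the fix of one frame, written as always rewriting both keys with the column values
lemma fixFrame_eq (prev cur : List (String × String)) (h : pvFrameOK cur) :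
    pvFixFrame prev cur =
      pvDSet (pvDSet cur "camera_direction"
          (if pvDGet cur "camera_direction" == pvDGet prev "camera_direction"
           then pvPickB (pvDGet prev "camera_direction") "wide establishing shot" "mid-shot"
           else pvDGet cur "camera_direction"))
        "style_tag"
        (if pvDGet cur "style_tag" == pvDGet prev "style_tag"
         then pvPickB (pvDGet prev "style_tag") "painterly realism" "golden hour cinematic"
         else pvDGet cur "style_tag") := by
  obtain ⟨hcam, hsty, hnd⟩ := h
  have hne : ("style_tag" : String) ≠ "camera_direction" := by decide
  by_cases h1 : (pvDGet cur "camera_direction" == pvDGet prev "camera_direction") = true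
  · by_cases h2 : (pvDGet cur "style_tag" == pvDGet prev "style_tag") = true
    · simp [pvFixFrame, h1, h2, pvDGet_set_ne _ _ _ _ hne]
    · simp only [Bool.not_eq_true] at h2
      simp only [pvFixFrame, h1, if_true, pvDGet_set_ne _ _ _ _ hne, h2, Bool.false_eq_true,
        if_false]
      rw [← pvDGet_set_ne cur "camera_direction"
            (pvPickB (pvDGet prev "camera_direction") "wide establishing shot" "mid-shot") _ hne]
      rw [pvDSet_self]
      · exact (map_fst_set cur _ _ hcam) ▸ hnd
      · exact contains_set _ _ _ _ hsty
  · simp only [Bool.not_eq_true] at h1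
    by_cases h2 : (pvDGet cur "style_tag" == pvDGet prev "style_tag") = true
    · simp only [pvFixFrame, h1, Bool.false_eq_true, if_false, h2, if_true]
      rw [pvDSet_self cur "camera_direction" hnd hcam]
    · simp only [Bool.not_eq_true] at h2
      simp only [pvFixFrame, h1, h2, Bool.false_eq_true, if_false]
      rw [pvDSet_self cur "camera_direction" hnd hcam, pvDSet_self cur "style_tag" hnd hsty]

lemma frameOK_set (f : List (String × String)) (k v : String)
    (hk : (PySem.Dict.mk f).contains k = true) (h : pvFrameOK f) :
    pvFrameOK (pvDSet f k v) :=
  ⟨contains_set _ _ _ _ h.1, contains_set _ _ _ _ h.2.1, (map_fst_set f k v hk) ▸ h.2.2⟩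

-- the row sweep equals the zipped column scans
lemma sweep_eq_cols (rest : List (List (String × String))) :
    ∀ prev : List (String × String), pvFrameOK prev → (∀ f ∈ rest, pvFrameOK f) →
    pvSweep prev rest
      = (rest.zip ((pvFixColGo "wide establishing shot" "mid-shot" (pvDGet prev "camera_direction")
                      (rest.map (fun f => pvDGet f "camera_direction"))).zip
                   (pvFixColGo "painterly realism" "golden hour cinematic" (pvDGet prev "style_tag")
                      (rest.map (fun f => pvDGet f "style_tag"))))).map
          (fun p => pvDSet (pvDSet p.1 "camera_direction" p.2.1) "style_tag" p.2.2) := by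
  induction rest with
  | nil => intro prev _ _; simp [pvSweep, pvFixColGo]
  | cons cur rs ih =>
    intro prev hprev hall
    have hcur : pvFrameOK cur := hall cur (by simp)
    have hrs : ∀ f ∈ rs, pvFrameOK f := fun f hf => hall f (by simp [hf])
    simp only [pvSweep, List.map_cons, pvFixColGo, List.zip_cons_cons, List.map_cons]
    have hhead := fixFrame_eq prev cur hcur
    set nc := (if pvDGet cur "camera_direction" == pvDGet prev "camera_direction"
           then pvPickB (pvDGet prev "camera_direction") "wide establishing shot" "mid-shot"
           else pvDGet cur "camera_direction") with hnc
    set nt := (if pvDGet cur "style_tag" == pvDGet prev "style_tag"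
         then pvPickB (pvDGet prev "style_tag") "painterly realism" "golden hour cinematic"
         else pvDGet cur "style_tag") with hnt
    have hOK' : pvFrameOK (pvFixFrame prev cur) := by
      rw [hhead]
      exact frameOK_set _ _ _ (contains_set _ _ _ _ hcur.2.1)
        (frameOK_set _ _ _ hcur.1 hcur)
    have hgc : pvDGet (pvFixFrame prev cur) "camera_direction" = nc := by
      rw [hhead, pvDGet_set_ne _ _ _ _ (by decide : ("camera_direction" : String) ≠ "style_tag"),
          pvDGet_set_self]
    have hgs : pvDGet (pvFixFrame prev cur) "style_tag" = nt := by
      rw [hhead, pvDGet_set_self]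
    rw [ih (pvFixFrame prev cur) hOK' hrs, hgc, hgs, hhead]

-- ===== VERDICT (by name: the statement is the Claim_ definition above) =====
theorem postprocess_frames_metadata_only_py_spec : Claim_equal_postprocess_frames_metadata_only_py := by
  intro frames _ hpre
  unfold Spec_postprocess_frames_metadata_only_py
  unfold postprocess_frames_metadata_only_py postprocess_frames_metadata_only_py_alt
  match frames, hpre with
  | [], _ => simp [PySem.List.pyRange_one_eq_nil]
  | [f], _ => simp [PySem.List.pyRange_one_eq_nil]
  | f :: g :: rest, hpre =>
    have hall : ∀ x ∈ f :: g :: rest, pvFrameOK x := hpre (by simp)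
    have hA := loop_eq (g :: rest) [] f
    simp only [List.nil_append, List.length_nil, Nat.cast_zero, zero_add] at hA
    have hlen : ((f :: g :: rest).length : Int) = 1 + ((g :: rest).length : Int) := by
      simp [List.length_cons]; ring
    rw [hlen, hA]
    have hguard : ¬ (f :: g :: rest).length < 2 := by simp [List.length_cons]
    rw [if_neg hguard]
    simp only [List.map_cons, pvFixCol, List.zip_cons_cons, List.map_cons]
    have hf : pvFrameOK f := hall f (by simp)
    rw [sweep_eq_cols (g :: rest) f hf (fun x hx => hall x (by simp [hx]))]
    rw [← pvDGet_set_ne f "camera_direction" (pvDGet f "camera_direction") "style_tag"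
          (by decide : ("style_tag" : String) ≠ "camera_direction")]
    rw [pvDSet_self f "camera_direction" hf.2.2 hf.1]
    rw [pvDSet_self f "style_tag" hf.2.2 hf.2.1]
    simp
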